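-- pv_equiv track=rewrite | github.com/tnotesjs/TNotes.leetcode | notes/1599. 经营摩天轮的最大利润【中等】/solutions/1/1.py | minOperationsMaxProfit
-- ===== SOURCE A (Python) =====
-- def minOperationsMaxProfit(customers: list[int], boardingCost: int, runningCost: int) -> int:
--     waiting = profit = max_profit = 0
--     best_rot = -1
--     rot = i = 0
--     while i < len(customers) or waiting > 0:
--         if i < len(customers):
--             waiting += customers[i]
--         board = min(waiting, 4)
--         waiting -= board
--         rot += 1
--         profit += board * boardingCost - runningCost
--         if profit > max_profit:
--             max_profit = profit
--             best_rot = rot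
--         i += 1
--     return best_rot
-- ===== SOURCE B (Python) =====
-- def minOperationsMaxProfit(customers: list[int], boardingCost: int, runningCost: int) -> int:
--     # O(n): simulate the n arrival rotations, then close-form the constant-4 draining tail.
--     waiting = profit = max_profit = 0
--     best_rot = -1
--     for i, c in enumerate(customers):
--         waiting += c
--         board = min(waiting, 4)
--         waiting -= board
--         profit += board * boardingCost - runningCost
--         if profit > max_profit:
--             max_profit = profit
--             best_rot = i + 1
--     rot = len(customers)
--     q, r = divmod(waiting, 4)
--     d = 4 * boardingCost - runningCost
--     if q > 0 and d > 0 and profit + q * d > max_profit: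
--         max_profit = profit + q * d
--         best_rot = rot + q
--     profit += q * d
--     if r > 0 and profit + r * boardingCost - runningCost > max_profit:
--         best_rot = rot + q + 1
--     return best_rot
-- ===== Notes on version B (the rewrite author's own statement) =====
-- stated objective: faster
-- what changed: A drains the leftover waiting queue one 4-person rotation at a time; B simulates only the n arrival rotations and replaces the whole draining tail with an O(1) closed form (q,r = divmod(waiting,4) plus a monotonicity argument on the constant per-rotation profit delta).
import Mathlib
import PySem

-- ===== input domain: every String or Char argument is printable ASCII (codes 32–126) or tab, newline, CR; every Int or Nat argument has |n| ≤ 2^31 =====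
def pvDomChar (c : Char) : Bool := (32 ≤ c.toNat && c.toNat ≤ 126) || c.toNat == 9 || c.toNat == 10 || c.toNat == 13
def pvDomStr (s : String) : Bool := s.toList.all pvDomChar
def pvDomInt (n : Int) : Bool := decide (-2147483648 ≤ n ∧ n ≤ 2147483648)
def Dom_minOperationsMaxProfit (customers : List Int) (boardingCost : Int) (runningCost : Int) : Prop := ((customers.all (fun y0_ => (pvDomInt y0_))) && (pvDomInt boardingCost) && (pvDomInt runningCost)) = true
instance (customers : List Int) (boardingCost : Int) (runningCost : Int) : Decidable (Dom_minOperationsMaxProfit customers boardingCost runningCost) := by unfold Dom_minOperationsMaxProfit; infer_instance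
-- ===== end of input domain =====

-- B replaces A's rotation-by-rotation draining of the leftover queue (O(totalWaiting/4) extra
-- rotations) by an O(1) closed form for the constant-4 tail; objective: faster (asymptotic).

-- ===== PORT A =====
-- A's while loop, split at its own branch 'if i < len(customers)': the phase with customers left
-- (structural recursion on the remaining list) and the draining phase (recursion on waiting).
def pvTailA (bc rc waiting profit maxProfit bestRot rot : Int) : Int :=
  if h : 0 < waiting then
    let board := min waiting 4
    let profit' := profit + board * bc - rc
    if maxProfit < profit' then
      pvTailA bc rc (waiting - board) profit' profit' (rot + 1) (rot + 1)
    else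
      pvTailA bc rc (waiting - board) profit' maxProfit bestRot (rot + 1)
  else bestRot
termination_by waiting.toNat
decreasing_by all_goals omega

def pvMainA (bc rc : Int) : List Int → Int → Int → Int → Int → Int → Int
  | [], waiting, profit, maxProfit, bestRot, rot =>
      pvTailA bc rc waiting profit maxProfit bestRot rot
  | c :: rest, waiting, profit, maxProfit, bestRot, rot =>
      let w := waiting + c
      let board := min w 4
      let profit' := profit + board * bc - rc
      if maxProfit < profit' then
        pvMainA bc rc rest (w - board) profit' profit' (rot + 1) (rot + 1)
      else
        pvMainA bc rc rest (w - board) profit' maxProfit bestRot (rot + 1)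

def minOperationsMaxProfit (customers : List Int) (boardingCost : Int) (runningCost : Int) : Int :=
  pvMainA boardingCost runningCost customers 0 0 0 (-1) 0

-- ===== PORT B =====
-- one arrival step of B's for-loop (state: waiting, profit, max_profit, best_rot)
def pvStepB (bc rc : Int) (st : Int × Int × Int × Int) (ic : Int × Int) : Int × Int × Int × Int :=
  let w := st.1 + ic.2
  let board := min w 4
  let profit' := st.2.1 + board * bc - rc
  if st.2.2.1 < profit' then (w - board, profit', profit', ic.1 + 1)
  else (w - board, profit', st.2.2.1, st.2.2.2)

-- B's O(1) closed form for the draining tail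
def pvTailB (bc rc waiting profit maxProfit bestRot rot : Int) : Int :=
  let q := PySem.Int.floordiv waiting 4
  let r := PySem.Int.mod waiting 4
  let d := 4 * bc - rc
  let maxProfit' := if 0 < q ∧ 0 < d ∧ maxProfit < profit + q * d then profit + q * d else maxProfit
  let bestRot' := if 0 < q ∧ 0 < d ∧ maxProfit < profit + q * d then rot + q else bestRot
  let profit' := profit + q * d
  if 0 < r ∧ maxProfit' < profit' + r * bc - rc then rot + q + 1 else bestRot'

def minOperationsMaxProfit_alt (customers : List Int) (boardingCost : Int) (runningCost : Int) : Int :=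
  let st := (PySem.List.enumerate customers).foldl (pvStepB boardingCost runningCost) (0, 0, 0, -1)
  pvTailB boardingCost runningCost st.1 st.2.1 st.2.2.1 st.2.2.2 (customers.length : Int)

-- ===== PRECONDITION & SPEC =====
def Spec_minOperationsMaxProfit (customers : List Int) (boardingCost : Int) (runningCost : Int) (out : Int) : Prop := out = minOperationsMaxProfit_alt customers boardingCost runningCost
instance (customers : List Int) (boardingCost : Int) (runningCost : Int) (out : Int) : Decidable (Spec_minOperationsMaxProfit customers boardingCost runningCost out) := by unfold Spec_minOperationsMaxProfit; infer_instance

-- ===== CLAIM (what is proved, stated in full; the proofs are below) =====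
def Claim_equal_minOperationsMaxProfit : Prop := ∀ (customers : List Int) (boardingCost : Int) (runningCost : Int), Dom_minOperationsMaxProfit customers boardingCost runningCost → Spec_minOperationsMaxProfit customers boardingCost runningCost (minOperationsMaxProfit customers boardingCost runningCost)

-- ===== LEMMAS AND PROOFS =====

-- one draining iteration of A, seen through B's closed form
theorem pvTailB_step (bc rc w p m br rot : Int) (hw : 0 < w) (hpm : p ≤ m) :
    (if m < p + min w 4 * bc - rc
     then pvTailB bc rc (w - min w 4) (p + min w 4 * bc - rc) (p + min w 4 * bc - rc) (rot + 1) (rot + 1)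
     else pvTailB bc rc (w - min w 4) (p + min w 4 * bc - rc) m br (rot + 1))
    = pvTailB bc rc w p m br rot := by
  by_cases h4 : 4 ≤ w
  · have hm : min w 4 = 4 := by omega
    have e1 : PySem.Int.floordiv (w - 4) 4 = PySem.Int.floordiv w 4 - 1 := by
      rw [PySem.Int.floordiv_eq_ediv_of_pos (by omega),
          PySem.Int.floordiv_eq_ediv_of_pos (by omega)]; omega
    have e2 : PySem.Int.mod (w - 4) 4 = PySem.Int.mod w 4 := by
      rw [PySem.Int.mod_eq_emod_of_pos (by omega),
          PySem.Int.mod_eq_emod_of_pos (by omega)]; omega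
    have hq1 : 1 ≤ PySem.Int.floordiv w 4 := by
      rw [PySem.Int.floordiv_eq_ediv_of_pos (by omega)]; omega
    have hr : 0 ≤ PySem.Int.mod w 4 ∧ PySem.Int.mod w 4 < 4 := by
      rw [PySem.Int.mod_eq_emod_of_pos (by omega)]; omega
    rw [hm]
    set q := PySem.Int.floordiv w 4 with hqdef
    set r := PySem.Int.mod w 4 with hrdef
    simp only [pvTailB, e1, e2]
    have hring : (q - 1) * (4 * bc - rc) = q * (4 * bc - rc) - (4 * bc - rc) := by ring
    rw [hring]
    set t := q * (4 * bc - rc) with htdef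
    set u := r * bc with hudef
    by_cases hd : 0 < 4 * bc - rc
    · by_cases hq2 : 2 ≤ q
      · have h2t : 2 * (4 * bc - rc) ≤ t := by rw [htdef]; nlinarith
        split_ifs <;> omega
      · have hq1e : q = 1 := by omega
        have htd : t = 4 * bc - rc := by rw [htdef, hq1e]; ring
        split_ifs <;> omega
    · have htle : t ≤ 4 * bc - rc := by rw [htdef]; nlinarith
      split_ifs <;> omega
  · have hm : min w 4 = w := by omega
    have hww : w - w = 0 := sub_self w
    have e1 : PySem.Int.floordiv (0 : Int) 4 = 0 := by
      rw [PySem.Int.floordiv_eq_ediv_of_pos (by omega)]; omega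
    have e2 : PySem.Int.mod (0 : Int) 4 = 0 := by
      rw [PySem.Int.mod_eq_emod_of_pos (by omega)]; omega
    have e3 : PySem.Int.floordiv w 4 = 0 := by
      rw [PySem.Int.floordiv_eq_ediv_of_pos (by omega)]; omega
    have e4 : PySem.Int.mod w 4 = w := by
      rw [PySem.Int.mod_eq_emod_of_pos (by omega)]; omega
    rw [hm, hww]
    simp only [pvTailB, e1, e2, e3, e4]
    set u := w * bc with hudef
    split_ifs <;> omega

-- the draining loop of A equals B's closed form, for any reachable state (waiting ≥ 0, profit ≤ max)
theorem pvTail_eq (bc rc : Int) (n : Nat) :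
    ∀ w p m br rot : Int, w.toNat ≤ n → 0 ≤ w → p ≤ m →
      pvTailA bc rc w p m br rot = pvTailB bc rc w p m br rot := by
  induction n with
  | zero =>
      intro w p m br rot hn hw _
      have hw0 : w = 0 := by omega
      subst hw0
      rw [pvTailA]
      simp [pvTailB, PySem.Int.floordiv, PySem.Int.mod]
  | succ n ih =>
      intro w p m br rot hn hw hpm
      rw [pvTailA]
      by_cases hpos : 0 < w
      · simp only [hpos, dif_pos]
        by_cases hc : m < p + min w 4 * bc - rc
        · rw [if_pos hc, ih _ _ _ _ _ (by omega) (by omega) le_rfl,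
              ← pvTailB_step bc rc w p m br rot hpos hpm, if_pos hc]
        · rw [if_neg hc, ih _ _ _ _ _ (by omega) (by omega) (by omega),
              ← pvTailB_step bc rc w p m br rot hpos hpm, if_neg hc]
      · have hw0 : w = 0 := by omega
        subst hw0
        simp [pvTailB, PySem.Int.floordiv, PySem.Int.mod]

-- the customer phase: A's recursion equals B's foldl over the enumerated list, then the tail
theorem pvMain_eq (bc rc : Int) :
    ∀ (cs : List Int) (i : Nat) (w p m br : Int), 0 ≤ w → p ≤ m →
      pvMainA bc rc cs w p m br (i : Int) =
        (let st := (PySem.List.enumerate cs (i : Int)).foldl (pvStepB bc rc) (w, p, m, br)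
         pvTailB bc rc st.1 st.2.1 st.2.2.1 st.2.2.2 ((i + cs.length : Nat) : Int)) := by
  intro cs
  induction cs with
  | nil =>
      intro i w p m br hw hpm
      simpa [pvMainA] using pvTail_eq bc rc w.toNat w p m br (i : Int) le_rfl hw hpm
  | cons c rest ih =>
      intro i w p m br hw hpm
      have h1 := ih (i + 1) (w + c - min (w + c) 4) (p + min (w + c) 4 * bc - rc)
      simp only [pvMainA, pvStepB, PySem.List.enumerate_cons, List.foldl_cons]
      by_cases hc : m < p + min (w + c) 4 * bc - rc
      · rw [if_pos hc]
        have := h1 (p + min (w + c) 4 * bc - rc) (↑i + 1) (by omega) le_rfl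
        rw [show ((i:Int) + 1) = ((i + 1 : Nat) : Int) by push_cast; ring] at this ⊢
        rw [this]
        simp only [if_pos hc]
        norm_num [Nat.add_assoc, Nat.add_comm 1]
      · rw [if_neg hc]
        have := h1 m br (by omega) (by omega)
        rw [show ((i:Int) + 1) = ((i + 1 : Nat) : Int) by push_cast; ring]
        rw [this]
        simp only [if_neg hc]
        norm_num [Nat.add_assoc, Nat.add_comm 1]

-- ===== VERDICT (by name: the statement is the Claim_ definition above) =====
theorem minOperationsMaxProfit_spec : Claim_equal_minOperationsMaxProfit := by
  intro customers bc rc _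
  unfold Spec_minOperationsMaxProfit minOperationsMaxProfit minOperationsMaxProfit_alt
  simpa using pvMain_eq bc rc customers 0 0 0 0 (-1) le_rfl le_rfl
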